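-- pv_equiv track=rewrite | github.com/sagarueda/cb-contest-dashboard-portfolios | codigo_extra/historical_score_1.py | __bonusGrid
-- ===== SOURCE A (Python) =====
-- def __bonusGrid(max_times_in_top):
--
--     '''
--     @param max_times_in_top: max number of times a bonus was given during all past contests
--     @return: dictionary = {key1: {key2: bonusValue}}
--                         key1: string "rangen"
--                         key2: int times the participant entered the top 90% in previous contests, (0-n)
--                         bonusValue: bonus for that contest position and top 90% times.
--     '''
--
--     score_level1 = [score for score in range(20, 100 + 1, 20)]
--     score_level2 = [score for score in range(15, 100, 15)] #max number will be 90
--     score_level3 = [score for score in range(10, 100 + 1, 10)]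
--     score_level4 = [score for score in range(5, 100 + 1, 5)]
--
--     score_list = [score_level1, score_level2, score_level3, score_level4]
--
--     bonus_grid = {}
--     bonus_grid["range1"]={}
--
--     for n in range(max_times_in_top + 1):
--
--         if n < len(score_list[0]):
--             bonus_grid["range1"][n]= score_list[0][n]
--
--         else:
--             bonus_grid["range1"][n]= score_list[0][-1]
--
--     bonus_grid["range2"]={}
--
--     for n in range(max_times_in_top + 1):
--
--         if n < len(score_list[1]):
--             bonus_grid["range2"][n] = score_list[1][n]
--
--         else:
--             bonus_grid["range2"][n]= score_list[1][-1]
--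
--     bonus_grid["range3"]={}
--
--     for n in range(max_times_in_top + 1):
--
--         if n < len(score_list[2]):
--             bonus_grid["range3"][n] = score_list[2][n]
--
--         else:
--             bonus_grid["range3"][n] = score_list[2][-1]
--
--     bonus_grid["range4"]={}
--
--     for n in range(max_times_in_top + 1):
--         if n < len(score_list[3]):
--             bonus_grid["range4"][n] = score_list[3][n]
--
--         else:
--             bonus_grid["range4"][n] = score_list[3][-1]
--
--     return bonus_grid
-- ===== SOURCE B (Python) =====
-- def __bonusGrid(max_times_in_top):
--     # closed-form capped bonuses instead of precomputed score tables
--     return {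
--         "range1": {n: min(20 * (n + 1), 100) for n in range(max_times_in_top + 1)},
--         "range2": {n: min(15 * (n + 1), 90) for n in range(max_times_in_top + 1)},
--         "range3": {n: min(10 * (n + 1), 100) for n in range(max_times_in_top + 1)},
--         "range4": {n: min(5 * (n + 1), 100) for n in range(max_times_in_top + 1)},
--     }
-- ===== Notes on version B (the rewrite author's own statement) =====
-- stated objective: simpler
-- what changed: Replaces the four precomputed score_level tables and the four table-lookup-with-fallback loops by four dict comprehensions that compute each capped bonus directly with a closed-form min formula (step times n plus one, capped at the table's true last entry, which for range2 is below one hundred).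
import Mathlib
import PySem

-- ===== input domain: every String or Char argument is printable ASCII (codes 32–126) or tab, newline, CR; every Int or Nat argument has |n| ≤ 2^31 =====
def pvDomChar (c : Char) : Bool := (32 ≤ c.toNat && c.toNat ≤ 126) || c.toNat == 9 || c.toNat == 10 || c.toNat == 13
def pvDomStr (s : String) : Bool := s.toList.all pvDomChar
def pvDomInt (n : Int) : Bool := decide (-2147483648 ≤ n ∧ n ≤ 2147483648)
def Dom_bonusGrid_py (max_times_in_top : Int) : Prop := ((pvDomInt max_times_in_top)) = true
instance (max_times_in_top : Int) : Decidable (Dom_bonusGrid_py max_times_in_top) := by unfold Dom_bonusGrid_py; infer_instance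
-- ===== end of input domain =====

-- B replaces A's four precomputed score tables + lookup-with-fallback loops by four dict
-- comprehensions computing each capped bonus with a closed-form min formula (objective: simpler).

-- ===== PORT A =====
-- literal transliteration of __bonusGrid: four score_level tables via range(), then four
-- loops each filling an inner dict by table lookup with a last-element fallback.
-- xs[n] / xs[-1] on the always-nonempty, always-in-range tables are ported as pyGetD
-- (default 0 is never reached: the condition/branch guarantees the index is in range).
def bonusGrid_py (max_times_in_top : Int) : List (String × List (Int × Int)) :=
  let score_level1 := PySem.List.pyRange 20 (100 + 1) 20
  let score_level2 := PySem.List.pyRange 15 100 15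
  let score_level3 := PySem.List.pyRange 10 (100 + 1) 10
  let score_level4 := PySem.List.pyRange 5 (100 + 1) 5
  let score_list := [score_level1, score_level2, score_level3, score_level4]
  let range1 : PySem.Dict Int Int :=
    (PySem.List.pyRange 0 (max_times_in_top + 1) 1).foldl
      (fun d n =>
        if n < ((PySem.List.pyGetD score_list 0 []).length : Int) then
          d.insert n (PySem.List.pyGetD (PySem.List.pyGetD score_list 0 []) n 0)
        else
          d.insert n (PySem.List.pyGetD (PySem.List.pyGetD score_list 0 []) (-1) 0))
      PySem.Dict.empty
  let range2 : PySem.Dict Int Int :=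
    (PySem.List.pyRange 0 (max_times_in_top + 1) 1).foldl
      (fun d n =>
        if n < ((PySem.List.pyGetD score_list 1 []).length : Int) then
          d.insert n (PySem.List.pyGetD (PySem.List.pyGetD score_list 1 []) n 0)
        else
          d.insert n (PySem.List.pyGetD (PySem.List.pyGetD score_list 1 []) (-1) 0))
      PySem.Dict.empty
  let range3 : PySem.Dict Int Int :=
    (PySem.List.pyRange 0 (max_times_in_top + 1) 1).foldl
      (fun d n =>
        if n < ((PySem.List.pyGetD score_list 2 []).length : Int) then
          d.insert n (PySem.List.pyGetD (PySem.List.pyGetD score_list 2 []) n 0)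
        else
          d.insert n (PySem.List.pyGetD (PySem.List.pyGetD score_list 2 []) (-1) 0))
      PySem.Dict.empty
  let range4 : PySem.Dict Int Int :=
    (PySem.List.pyRange 0 (max_times_in_top + 1) 1).foldl
      (fun d n =>
        if n < ((PySem.List.pyGetD score_list 3 []).length : Int) then
          d.insert n (PySem.List.pyGetD (PySem.List.pyGetD score_list 3 []) n 0)
        else
          d.insert n (PySem.List.pyGetD (PySem.List.pyGetD score_list 3 []) (-1) 0))
      PySem.Dict.empty
  let bonus_grid : PySem.Dict String (PySem.Dict Int Int) :=
    ((((PySem.Dict.empty).insert "range1" range1).insert "range2" range2).insert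
        "range3" range3).insert "range4" range4
  bonus_grid.items.map (fun p => (p.1, p.2.items))

-- ===== PORT B =====
-- transliteration of Source B: each dict comprehension runs over the distinct keys of
-- range(max_times_in_top + 1), so its items list is exactly this map (exact).
def bonusGrid_py_alt (max_times_in_top : Int) : List (String × List (Int × Int)) :=
  [("range1", (PySem.List.pyRange 0 (max_times_in_top + 1) 1).map
      (fun n => (n, min (20 * (n + 1)) 100))),
   ("range2", (PySem.List.pyRange 0 (max_times_in_top + 1) 1).map
      (fun n => (n, min (15 * (n + 1)) 90))),
   ("range3", (PySem.List.pyRange 0 (max_times_in_top + 1) 1).map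
      (fun n => (n, min (10 * (n + 1)) 100))),
   ("range4", (PySem.List.pyRange 0 (max_times_in_top + 1) 1).map
      (fun n => (n, min (5 * (n + 1)) 100)))]

-- ===== PRECONDITION & SPEC =====
def Spec_bonusGrid_py (max_times_in_top : Int) (out : List (String × List (Int × Int))) : Prop := out = bonusGrid_py_alt max_times_in_top
instance (max_times_in_top : Int) (out : List (String × List (Int × Int))) : Decidable (Spec_bonusGrid_py max_times_in_top out) := by unfold Spec_bonusGrid_py; infer_instance

-- ===== CLAIM (what is proved, stated in full; the proofs are below) =====
def Claim_equal_bonusGrid_py : Prop := ∀ (max_times_in_top : Int), Dom_bonusGrid_py max_times_in_top → Spec_bonusGrid_py max_times_in_top (bonusGrid_py max_times_in_top)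

-- ===== LEMMAS AND PROOFS =====

-- one of A's fill loops, as a fold over fresh distinct keys, has items = the obvious map
lemma fill_items (m : Int) (f : Int → Int) :
    ((PySem.List.pyRange 0 (m + 1) 1).foldl
        (fun (d : PySem.Dict Int Int) n => d.insert n (f n)) PySem.Dict.empty).items
      = (PySem.List.pyRange 0 (m + 1) 1).map (fun n => (n, f n)) := by
  have h := PySem.Dict.items_foldl_insert_fresh
      (l := PySem.List.pyRange 0 (m + 1) 1) (k := fun n => n) (v := f)
      (d := PySem.Dict.empty)
      (by intro a _; exact PySem.Dict.contains_empty a)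
      (by simpa using PySem.List.nodup_pyRange_one 0 (m + 1))
  simpa using h

-- the branch of A's loop body, pulled through the insert
lemma fold_body_eq (m : Int) (lst : List Int) :
    ((PySem.List.pyRange 0 (m + 1) 1).foldl
        (fun (d : PySem.Dict Int Int) n =>
          if n < (lst.length : Int) then d.insert n (PySem.List.pyGetD lst n 0)
          else d.insert n (PySem.List.pyGetD lst (-1) 0)) PySem.Dict.empty)
      = ((PySem.List.pyRange 0 (m + 1) 1).foldl
          (fun (d : PySem.Dict Int Int) n =>
            d.insert n (if n < (lst.length : Int) then PySem.List.pyGetD lst n 0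
                        else PySem.List.pyGetD lst (-1) 0)) PySem.Dict.empty) := by
  apply PySem.List.foldl_congr_mem
  intro acc x _
  exact (apply_ite (acc.insert x) _ _ _).symm

-- per-range value lemmas: table lookup with fallback = closed-form capped value
lemma val1 (n : Int) (h0 : 0 ≤ n) :
    (if n < ((PySem.List.pyRange 20 (100 + 1) 20).length : Int) then
        PySem.List.pyGetD (PySem.List.pyRange 20 (100 + 1) 20) n 0
      else PySem.List.pyGetD (PySem.List.pyRange 20 (100 + 1) 20) (-1) 0)
      = min (20 * (n + 1)) 100 := by
  have hl : PySem.List.pyRange 20 (100 + 1) 20 = [20, 40, 60, 80, 100] := by decide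
  rw [hl]
  by_cases h : n < (([20, 40, 60, 80, 100] : List Int).length : Int)
  · simp only [if_pos h]
    simp only [List.length_cons, List.length_nil] at h
    interval_cases n <;> decide
  · simp only [if_neg h]
    simp only [List.length_cons, List.length_nil] at h
    have : min (20 * (n + 1)) 100 = 100 := by omega
    rw [this]; decide

lemma val2 (n : Int) (h0 : 0 ≤ n) :
    (if n < ((PySem.List.pyRange 15 100 15).length : Int) then
        PySem.List.pyGetD (PySem.List.pyRange 15 100 15) n 0
      else PySem.List.pyGetD (PySem.List.pyRange 15 100 15) (-1) 0)
      = min (15 * (n + 1)) 90 := by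
  have hl : PySem.List.pyRange 15 100 15 = [15, 30, 45, 60, 75, 90] := by decide
  rw [hl]
  by_cases h : n < (([15, 30, 45, 60, 75, 90] : List Int).length : Int)
  · simp only [if_pos h]
    simp only [List.length_cons, List.length_nil] at h
    interval_cases n <;> decide
  · simp only [if_neg h]
    simp only [List.length_cons, List.length_nil] at h
    have : min (15 * (n + 1)) 90 = 90 := by omega
    rw [this]; decide

lemma val3 (n : Int) (h0 : 0 ≤ n) :
    (if n < ((PySem.List.pyRange 10 (100 + 1) 10).length : Int) then
        PySem.List.pyGetD (PySem.List.pyRange 10 (100 + 1) 10) n 0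
      else PySem.List.pyGetD (PySem.List.pyRange 10 (100 + 1) 10) (-1) 0)
      = min (10 * (n + 1)) 100 := by
  have hl : PySem.List.pyRange 10 (100 + 1) 10
      = [10, 20, 30, 40, 50, 60, 70, 80, 90, 100] := by decide
  rw [hl]
  by_cases h : n < (([10, 20, 30, 40, 50, 60, 70, 80, 90, 100] : List Int).length : Int)
  · simp only [if_pos h]
    simp only [List.length_cons, List.length_nil] at h
    interval_cases n <;> decide
  · simp only [if_neg h]
    simp only [List.length_cons, List.length_nil] at h
    have : min (10 * (n + 1)) 100 = 100 := by omega
    rw [this]; decide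

lemma val4 (n : Int) (h0 : 0 ≤ n) :
    (if n < ((PySem.List.pyRange 5 (100 + 1) 5).length : Int) then
        PySem.List.pyGetD (PySem.List.pyRange 5 (100 + 1) 5) n 0
      else PySem.List.pyGetD (PySem.List.pyRange 5 (100 + 1) 5) (-1) 0)
      = min (5 * (n + 1)) 100 := by
  have hl : PySem.List.pyRange 5 (100 + 1) 5
      = [5, 10, 15, 20, 25, 30, 35, 40, 45, 50, 55, 60, 65, 70, 75, 80, 85, 90, 95, 100] := by
    decide
  rw [hl]
  by_cases h : n <
      (([5, 10, 15, 20, 25, 30, 35, 40, 45, 50, 55, 60, 65, 70, 75, 80, 85, 90, 95, 100] :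
          List Int).length : Int)
  · simp only [if_pos h]
    simp only [List.length_cons, List.length_nil] at h
    interval_cases n <;> decide
  · simp only [if_neg h]
    simp only [List.length_cons, List.length_nil] at h
    have : min (5 * (n + 1)) 100 = 100 := by omega
    rw [this]; decide

-- four inserts of the distinct range keys into the empty outer dict
lemma items_four {ν : Type} (r1 r2 r3 r4 : ν) :
    (((((PySem.Dict.empty : PySem.Dict String ν).insert "range1" r1).insert "range2" r2).insert
          "range3" r3).insert "range4" r4).items
      = [("range1", r1), ("range2", r2), ("range3", r3), ("range4", r4)] := by
  rw [PySem.Dict.items_insert_of_not_contains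
        (h := by simp [PySem.Dict.contains_insert, PySem.Dict.contains_empty]),
      PySem.Dict.items_insert_of_not_contains
        (h := by simp [PySem.Dict.contains_insert, PySem.Dict.contains_empty]),
      PySem.Dict.items_insert_of_not_contains
        (h := by simp [PySem.Dict.contains_insert, PySem.Dict.contains_empty]),
      PySem.Dict.items_insert_of_not_contains
        (h := PySem.Dict.contains_empty _)]
  rfl

-- items of one of A's filled inner dicts = the corresponding comprehension of B
lemma range_items (m : Int) (lst : List Int) (g : Int → Int)
    (hval : ∀ n : Int, 0 ≤ n →
      (if n < (lst.length : Int) then PySem.List.pyGetD lst n 0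
       else PySem.List.pyGetD lst (-1) 0) = g n) :
    ((PySem.List.pyRange 0 (m + 1) 1).foldl
        (fun (d : PySem.Dict Int Int) n =>
          if n < (lst.length : Int) then d.insert n (PySem.List.pyGetD lst n 0)
          else d.insert n (PySem.List.pyGetD lst (-1) 0)) PySem.Dict.empty).items
      = (PySem.List.pyRange 0 (m + 1) 1).map (fun n => (n, g n)) := by
  rw [fold_body_eq, fill_items]
  apply List.map_congr_left
  intro n hn
  have h0 : 0 ≤ n := ((PySem.List.mem_pyRange_one).1 hn).1
  simp [hval n h0]

-- ===== VERDICT (by name: the statement is the Claim_ definition above) =====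
theorem bonusGrid_py_spec : Claim_equal_bonusGrid_py := by
  intro m _
  show bonusGrid_py m = bonusGrid_py_alt m
  simp only [bonusGrid_py, bonusGrid_py_alt]
  have e0 : PySem.List.pyGetD
      [PySem.List.pyRange 20 (100 + 1) 20, PySem.List.pyRange 15 100 15,
        PySem.List.pyRange 10 (100 + 1) 10, PySem.List.pyRange 5 (100 + 1) 5] 0 []
      = PySem.List.pyRange 20 (100 + 1) 20 := by decide
  have e1 : PySem.List.pyGetD
      [PySem.List.pyRange 20 (100 + 1) 20, PySem.List.pyRange 15 100 15,
        PySem.List.pyRange 10 (100 + 1) 10, PySem.List.pyRange 5 (100 + 1) 5] 1 []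
      = PySem.List.pyRange 15 100 15 := by decide
  have e2 : PySem.List.pyGetD
      [PySem.List.pyRange 20 (100 + 1) 20, PySem.List.pyRange 15 100 15,
        PySem.List.pyRange 10 (100 + 1) 10, PySem.List.pyRange 5 (100 + 1) 5] 2 []
      = PySem.List.pyRange 10 (100 + 1) 10 := by decide
  have e3 : PySem.List.pyGetD
      [PySem.List.pyRange 20 (100 + 1) 20, PySem.List.pyRange 15 100 15,
        PySem.List.pyRange 10 (100 + 1) 10, PySem.List.pyRange 5 (100 + 1) 5] 3 []
      = PySem.List.pyRange 5 (100 + 1) 5 := by decide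
  rw [e0, e1, e2, e3]
  rw [items_four]
  simp only [List.map_cons, List.map_nil]
  rw [range_items m _ _ val1, range_items m _ _ val2,
    range_items m _ _ val3, range_items m _ _ val4]
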